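-- pv_equiv track=rewrite | github.com/kyoongdev/algorithm | 백준/17276.py | rotateMinus45
-- ===== SOURCE A (Python) =====
-- import copy
--
-- def rotateMinus45(arr,width):
--   newArr = copy.deepcopy(arr)
--
--
--   middle = width // 2
--
--   ## 주 대각선을 가운데 열로 옮긴다
--   for i in range(width):
--
--     newArr[middle][i] = arr[i][i]
--
--   ## 가운데 열을 X의 부 대각선으로 옮긴다
--   for i in range(width):
--
--     newArr[i][i] = arr[i][middle]
--
--   ## X의 부 대각선을 X의 가운데 행으로 옮긴다
--   for i in range(width):
--     newArr[i][middle] = arr[i][width - 1 - i]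
--
--   ## X의 가운데 행을 X의 주 대각선으로 옮긴다
--   for i in range(width):
--     newArr[width - 1 - i][i] = arr[middle][i]
--
--   return newArr
-- ===== SOURCE B (Python) =====
-- def rotateMinus45(arr, width):
--     middle = width // 2
--     def src(r, c):
--         if r < width and c < width:
--             if c == width - 1 - r:
--                 return arr[middle][c]
--             if c == middle:
--                 return arr[r][width - 1 - r]
--             if r == c:
--                 return arr[r][middle]
--             if r == middle:
--                 return arr[c][c]
--         return arr[r][c]
--     return [[src(r, c) for c in range(len(row))] for r, row in enumerate(arr)]
-- ===== Notes on version B (the rewrite author's own statement) =====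
-- stated objective: alternative
-- what changed: Replaces deepcopy followed by four mutating patch loops with a single double loop that builds the result fresh, choosing each cell's source via a priority chain that mirrors the loops' last-write-wins order (cells outside the width-by-width block are copied through).
import Mathlib
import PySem

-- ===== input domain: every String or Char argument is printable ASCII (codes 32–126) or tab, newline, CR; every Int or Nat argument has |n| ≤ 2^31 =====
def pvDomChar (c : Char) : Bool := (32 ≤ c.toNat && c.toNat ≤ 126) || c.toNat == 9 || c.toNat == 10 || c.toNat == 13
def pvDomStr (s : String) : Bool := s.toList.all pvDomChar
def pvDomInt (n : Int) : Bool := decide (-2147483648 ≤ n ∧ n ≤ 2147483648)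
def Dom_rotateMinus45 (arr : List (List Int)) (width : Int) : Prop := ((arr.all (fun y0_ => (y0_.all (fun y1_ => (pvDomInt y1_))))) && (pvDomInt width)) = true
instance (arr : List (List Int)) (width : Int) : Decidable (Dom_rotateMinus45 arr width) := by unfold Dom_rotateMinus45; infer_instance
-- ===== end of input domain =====

-- B builds the result fresh with one double loop and a last-write-wins priority chain,
-- instead of A's deepcopy followed by four mutating patch loops (objective: alternative decomposition).

-- arr[i][j] (exact under Pre_, where every index used is in range)
def pvGet2 (arr : List (List Int)) (i j : Int) : Int :=
  PySem.List.pyGetD (PySem.List.pyGetD arr i []) j 0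

-- newArr[i][j] = v (exact under Pre_, where every index used is in range)
def pvSet2 (m : List (List Int)) (i j : Int) (v : Int) : List (List Int) :=
  PySem.List.pySetD m i (PySem.List.pySetD (PySem.List.pyGetD m i []) j v)

-- ===== PORT A =====
def rotateMinus45 (arr : List (List Int)) (width : Int) : List (List Int) :=
  let newArr := arr  -- copy.deepcopy(arr): a value copy (the entries are ints)
  let middle := PySem.Int.floordiv width 2
  let n1 := (PySem.List.pyRange 0 width 1).foldl
    (fun m i => pvSet2 m middle i (pvGet2 arr i i)) newArr
  let n2 := (PySem.List.pyRange 0 width 1).foldl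
    (fun m i => pvSet2 m i i (pvGet2 arr i middle)) n1
  let n3 := (PySem.List.pyRange 0 width 1).foldl
    (fun m i => pvSet2 m i middle (pvGet2 arr i (width - 1 - i))) n2
  (PySem.List.pyRange 0 width 1).foldl
    (fun m i => pvSet2 m (width - 1 - i) i (pvGet2 arr middle i)) n3

-- ===== PORT B =====
def rotateMinus45_alt (arr : List (List Int)) (width : Int) : List (List Int) :=
  let middle := PySem.Int.floordiv width 2
  (PySem.List.enumerate arr 0).map (fun p =>
    (PySem.List.pyRange 0 (PySem.List.len p.2) 1).map (fun c =>
      if p.1 < width ∧ c < width then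
        (if c = width - 1 - p.1 then pvGet2 arr middle c
         else if c = middle then pvGet2 arr p.1 (width - 1 - p.1)
         else if p.1 = c then pvGet2 arr p.1 middle
         else if p.1 = middle then pvGet2 arr c c
         else pvGet2 arr p.1 c)
      else pvGet2 arr p.1 c))

-- ===== PRECONDITION & SPEC =====
-- Pre_ is exactly the closed-form shape condition under which A's index accesses are all in
-- range (so A returns; outside it A raises IndexError): either width ≤ 0 (all loops empty), or
-- arr has at least width rows, the middle row has at least width entries, and each of the first
-- width rows reaches its own diagonal, middle and anti-diagonal columns.
def Pre_rotateMinus45 (arr : List (List Int)) (width : Int) : Prop :=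
  width ≤ 0 ∨
    (width ≤ (arr.length : Int) ∧
     width ≤ (((arr.getD (width.toNat / 2) []).length : Nat) : Int) ∧
     ∀ r < width.toNat, r < (arr.getD r []).length ∧
       width.toNat / 2 < (arr.getD r []).length ∧
       width.toNat - 1 - r < (arr.getD r []).length)
instance (arr : List (List Int)) (width : Int) : Decidable (Pre_rotateMinus45 arr width) := by
  unfold Pre_rotateMinus45; infer_instance

def pvWitness_rotateMinus45 : List (List Int) × Int := ([[1, 2], [3, 4]], 2)

def Spec_rotateMinus45 (arr : List (List Int)) (width : Int) (out : List (List Int)) : Prop := out = rotateMinus45_alt arr width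
instance (arr : List (List Int)) (width : Int) (out : List (List Int)) : Decidable (Spec_rotateMinus45 arr width out) := by unfold Spec_rotateMinus45; infer_instance

-- ===== CLAIM (what is proved, stated in full; the proofs are below) =====
def Claim_equal_rotateMinus45 : Prop := ∀ (arr : List (List Int)) (width : Int), Dom_rotateMinus45 arr width → Pre_rotateMinus45 arr width → Spec_rotateMinus45 arr width (rotateMinus45 arr width)

-- ===== LEMMAS AND PROOFS =====

-- Nat-indexed cell read / write, the common normal form of both ports under Pre_.
def nGet (m : List (List Int)) (i j : Nat) : Int := (m.getD i []).getD j 0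
def nSet (m : List (List Int)) (i j : Nat) (v : Int) : List (List Int) :=
  m.set i ((m.getD i []).set j v)

theorem pvGet2_natCast (m : List (List Int)) (i j : Nat) :
    pvGet2 m (i : Int) (j : Int) = nGet m i j := by
  simp [pvGet2, nGet]

theorem pvSet2_natCast (m : List (List Int)) (i j : Nat) (v : Int) :
    pvSet2 m (i : Int) (j : Int) v = nSet m i j v := by
  simp [pvSet2, nSet]

theorem length_nSet (m : List (List Int)) (i j : Nat) (v : Int) :
    (nSet m i j v).length = m.length := by
  simp [nSet]

theorem rowLen_nSet (m : List (List Int)) (i j : Nat) (v : Int) (k : Nat) :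
    ((nSet m i j v).getD k []).length = (m.getD k []).length := by
  unfold nSet
  by_cases hik : i = k
  · subst hik
    by_cases hi : i < m.length
    · simp [List.getD, List.getElem?_set_self hi, List.getElem?_eq_getElem hi]
    · simp [List.set_eq_of_length_le (by omega : m.length ≤ i)]
  · simp [List.getD, List.getElem?_set_ne hik]

theorem nGet_nSet_same (m : List (List Int)) (i j : Nat) (v : Int)
    (hi : i < m.length) (hj : j < (m.getD i []).length) :
    nGet (nSet m i j v) i j = v := by
  unfold nGet nSet
  have hj' : j < ((m.getD i []).set j v).length := by simpa using hj
  rw [List.getD, List.getD, List.getElem?_set_self hi, Option.getD_some,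
    List.getElem?_eq_getElem hj', Option.getD_some, List.getElem_set_self]

theorem nGet_nSet_ne (m : List (List Int)) (i j r c : Nat) (v : Int)
    (h : i ≠ r ∨ j ≠ c) : nGet (nSet m i j v) r c = nGet m r c := by
  unfold nGet nSet
  by_cases hir : i = r
  · subst hir
    have hjc : j ≠ c := by tauto
    by_cases hi : i < m.length
    · simp [List.getD, List.getElem?_set_self hi, List.getElem?_set_ne hjc]
    · simp [List.set_eq_of_length_le (by omega : m.length ≤ i)]
  · simp [List.getD, List.getElem?_set_ne hir]

-- one patch loop at the Nat level
def natLoop (ρ γ : Nat → Nat) (v : Nat → Int) (n : Nat) (m : List (List Int)) :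
    List (List Int) :=
  (List.range n).foldl (fun m i => nSet m (ρ i) (γ i) (v i)) m

theorem length_natLoop (ρ γ : Nat → Nat) (v : Nat → Int) (n : Nat) (m : List (List Int)) :
    (natLoop ρ γ v n m).length = m.length := by
  induction n with
  | zero => simp [natLoop]
  | succ n ih =>
      simp only [natLoop, List.range_succ, List.foldl_append, List.foldl_cons,
        List.foldl_nil, length_nSet]
      exact ih

theorem rowLen_natLoop (ρ γ : Nat → Nat) (v : Nat → Int) (n : Nat) (m : List (List Int))
    (k : Nat) : ((natLoop ρ γ v n m).getD k []).length = (m.getD k []).length := by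
  induction n with
  | zero => simp [natLoop]
  | succ n ih =>
      simp only [natLoop, List.range_succ, List.foldl_append, List.foldl_cons,
        List.foldl_nil, rowLen_nSet]
      exact ih

theorem natLoop_get_miss (ρ γ : Nat → Nat) (v : Nat → Int) (n : Nat)
    (m : List (List Int)) (r c : Nat)
    (h : ∀ i, i < n → ¬(ρ i = r ∧ γ i = c)) :
    nGet (natLoop ρ γ v n m) r c = nGet m r c := by
  induction n with
  | zero => simp [natLoop]
  | succ n ih =>
      have hstep : ρ n ≠ r ∨ γ n ≠ c := by
        have := h n (by omega); tauto
      simp only [natLoop, List.range_succ, List.foldl_append, List.foldl_cons, List.foldl_nil]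
      rw [nGet_nSet_ne _ _ _ _ _ _ hstep]
      exact ih (fun i hi => h i (by omega))

theorem natLoop_get_hit (ρ γ : Nat → Nat) (v : Nat → Int) (n : Nat)
    (m : List (List Int)) (r c i0 : Nat) (hi0 : i0 < n)
    (h : ∀ i, i < n → ((ρ i = r ∧ γ i = c) ↔ i = i0))
    (hr : r < m.length) (hc : c < (m.getD r []).length) :
    nGet (natLoop ρ γ v n m) r c = v i0 := by
  induction n with
  | zero => omega
  | succ n ih =>
      simp only [natLoop, List.range_succ, List.foldl_append, List.foldl_cons, List.foldl_nil]
      by_cases hlast : i0 = n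
      · subst hlast
        have hρ : ρ i0 = r ∧ γ i0 = c := (h i0 (by omega)).mpr rfl
        rw [hρ.1, hρ.2]
        exact nGet_nSet_same _ _ _ _
          (by rw [show ((List.range i0).foldl (fun m i => nSet m (ρ i) (γ i) (v i)) m) =
                natLoop ρ γ v i0 m from rfl, length_natLoop]; exact hr)
          (by rw [show ((List.range i0).foldl (fun m i => nSet m (ρ i) (γ i) (v i)) m) =
                natLoop ρ γ v i0 m from rfl, rowLen_natLoop]; exact hc)
      · have hstep : ρ n ≠ r ∨ γ n ≠ c := by
          by_contra hcon
          push_neg at hcon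
          have : n = i0 := (h n (by omega)).mp ⟨hcon.1, hcon.2⟩
          omega
        rw [nGet_nSet_ne _ _ _ _ _ _ hstep]
        exact ih (by omega) (fun i hi => h i (by omega))

-- the source cell of output cell (r,c): B's priority chain at the Nat level
def srcF (arr : List (List Int)) (n r c : Nat) : Int :=
  if r < n ∧ c < n then
    (if c = n - 1 - r then nGet arr (n / 2) c
     else if c = n / 2 then nGet arr r (n - 1 - r)
     else if r = c then nGet arr r (n / 2)
     else if r = n / 2 then nGet arr c c
     else nGet arr r c)
  else nGet arr r c

theorem floordiv_natCast_two (n : Nat) :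
    PySem.Int.floordiv (n : Int) 2 = ((n / 2 : Nat) : Int) := by
  exact_mod_cast PySem.Int.floordiv_natCast n 2

theorem pyRange_natCast (n : Nat) :
    PySem.List.pyRange 0 (n : Int) 1 = (List.range n).map (fun k : Nat => (k : Int)) := by
  rw [PySem.List.pyRange_one]
  simp

-- A's port, normalized to four Nat-level patch loops
theorem portA_norm (arr : List (List Int)) (n : Nat) :
    rotateMinus45 arr (n : Int) =
      natLoop (fun i => n - 1 - i) (fun i => i) (fun i => nGet arr (n / 2) i) n
        (natLoop (fun i => i) (fun _ => n / 2) (fun i => nGet arr i (n - 1 - i)) n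
          (natLoop (fun i => i) (fun i => i) (fun i => nGet arr i (n / 2)) n
            (natLoop (fun _ => n / 2) (fun i => i) (fun i => nGet arr i i) n arr))) := by
  have e1 : ∀ init : List (List Int),
      (List.range n).foldl (fun m (k : Nat) => pvSet2 m (((n / 2 : Nat)) : Int) (k : Int)
        (pvGet2 arr (k : Int) (k : Int))) init =
      natLoop (fun _ => n / 2) (fun i => i) (fun i => nGet arr i i) n init := by
    intro init
    unfold natLoop
    exact PySem.List.foldl_congr_mem _ _ _ _ (fun acc x hx => by
      rw [pvSet2_natCast, pvGet2_natCast])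
  have e2 : ∀ init : List (List Int),
      (List.range n).foldl (fun m (k : Nat) => pvSet2 m (k : Int) (k : Int)
        (pvGet2 arr (k : Int) (((n / 2 : Nat)) : Int))) init =
      natLoop (fun i => i) (fun i => i) (fun i => nGet arr i (n / 2)) n init := by
    intro init
    unfold natLoop
    exact PySem.List.foldl_congr_mem _ _ _ _ (fun acc x hx => by
      rw [pvSet2_natCast, pvGet2_natCast])
  have e3 : ∀ init : List (List Int),
      (List.range n).foldl (fun m (k : Nat) => pvSet2 m (k : Int) (((n / 2 : Nat)) : Int)
        (pvGet2 arr (k : Int) ((n : Int) - 1 - (k : Int)))) init =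
      natLoop (fun i => i) (fun _ => n / 2) (fun i => nGet arr i (n - 1 - i)) n init := by
    intro init
    unfold natLoop
    exact PySem.List.foldl_congr_mem _ _ _ _ (fun acc x hx => by
      have hx' : x < n := List.mem_range.mp hx
      have hcast : (n : Int) - 1 - (x : Int) = ((n - 1 - x : Nat) : Int) := by omega
      rw [hcast, pvSet2_natCast, pvGet2_natCast])
  have e4 : ∀ init : List (List Int),
      (List.range n).foldl (fun m (k : Nat) => pvSet2 m ((n : Int) - 1 - (k : Int)) (k : Int)
        (pvGet2 arr (((n / 2 : Nat)) : Int) (k : Int))) init =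
      natLoop (fun i => n - 1 - i) (fun i => i) (fun i => nGet arr (n / 2) i) n init := by
    intro init
    unfold natLoop
    exact PySem.List.foldl_congr_mem _ _ _ _ (fun acc x hx => by
      have hx' : x < n := List.mem_range.mp hx
      have hcast : (n : Int) - 1 - (x : Int) = ((n - 1 - x : Nat) : Int) := by omega
      rw [hcast, pvSet2_natCast, pvGet2_natCast])
  simp only [rotateMinus45, floordiv_natCast_two, pyRange_natCast, List.foldl_map]
  rw [e1, e2, e3, e4]

-- A's port on non-positive width: all four loops are empty
theorem portA_nonpos (arr : List (List Int)) (width : Int) (hw : width ≤ 0) :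
    rotateMinus45 arr width = arr := by
  simp only [rotateMinus45, PySem.List.pyRange_one_eq_nil hw, List.foldl_nil]

-- B's port, normalized to a double comprehension over srcF
theorem portB_norm (arr : List (List Int)) (n : Nat) :
    rotateMinus45_alt arr (n : Int) =
      (List.range arr.length).map (fun r =>
        (List.range ((arr.getD r []).length)).map (fun c => srcF arr n r c)) := by
  simp only [rotateMinus45_alt, floordiv_natCast_two]
  rw [PySem.List.enumerate_eq_map_pyRange arr ([] : List Int)]
  simp only [PySem.List.len_eq, pyRange_natCast, List.map_map]
  refine List.map_congr_left (fun r hr => ?_)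
  have hr' : r < arr.length := List.mem_range.mp hr
  simp only [Function.comp_apply, PySem.List.pyGetD_natCast]
  refine List.map_congr_left (fun c hc => ?_)
  have hc' : c < (arr.getD r []).length := List.mem_range.mp hc
  have hguard : (((r : Int) < (n : Int)) ∧ ((c : Int) < (n : Int))) = (r < n ∧ c < n) :=
    propext (by omega)
  simp only [Function.comp_apply, hguard]
  by_cases hg : r < n ∧ c < n
  · rw [if_pos hg, srcF, if_pos hg]
    have hcast : (n : Int) - 1 - (r : Int) = ((n - 1 - r : Nat) : Int) := by omega
    simp only [hcast, Nat.cast_inj, pvGet2_natCast]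
  · rw [if_neg hg, srcF, if_neg hg, pvGet2_natCast]

-- entries of A's four patch loops are exactly srcF
theorem quad_entry (arr : List (List Int)) (n : Nat)
    (hmid : n ≤ (arr.getD (n / 2) []).length)
    (hrows : ∀ ρ < n, ρ < (arr.getD ρ []).length ∧ n / 2 < (arr.getD ρ []).length ∧
      n - 1 - ρ < (arr.getD ρ []).length)
    (r c : Nat) (hr : r < arr.length) (hc : c < (arr.getD r []).length) :
    nGet (natLoop (fun i => n - 1 - i) (fun i => i) (fun i => nGet arr (n / 2) i) n
        (natLoop (fun i => i) (fun _ => n / 2) (fun i => nGet arr i (n - 1 - i)) n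
          (natLoop (fun i => i) (fun i => i) (fun i => nGet arr i (n / 2)) n
            (natLoop (fun _ => n / 2) (fun i => i) (fun i => nGet arr i i) n arr))))
      r c = srcF arr n r c := by
  set M1 := natLoop (fun _ => n / 2) (fun i => i) (fun i => nGet arr i i) n arr with hM1
  set M2 := natLoop (fun i => i) (fun i => i) (fun i => nGet arr i (n / 2)) n M1 with hM2
  set M3 := natLoop (fun i => i) (fun _ => n / 2) (fun i => nGet arr i (n - 1 - i)) n M2 with hM3
  have lenM1 : M1.length = arr.length := by rw [hM1, length_natLoop]
  have lenM2 : M2.length = arr.length := by rw [hM2, length_natLoop, lenM1]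
  have lenM3 : M3.length = arr.length := by rw [hM3, length_natLoop, lenM2]
  have rowM1 : ∀ k, ((M1.getD k []).length) = ((arr.getD k []).length) := by
    intro k; rw [hM1, rowLen_natLoop]
  have rowM2 : ∀ k, ((M2.getD k []).length) = ((arr.getD k []).length) := by
    intro k; rw [hM2, rowLen_natLoop, rowM1]
  have rowM3 : ∀ k, ((M3.getD k []).length) = ((arr.getD k []).length) := by
    intro k; rw [hM3, rowLen_natLoop, rowM2]
  unfold srcF
  by_cases hg : r < n ∧ c < n
  · obtain ⟨hrn, hcn⟩ := hg
    rw [if_pos ⟨hrn, hcn⟩]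
    have hrowr := hrows r hrn
    by_cases h4 : c = n - 1 - r
    · rw [if_pos h4]
      exact natLoop_get_hit _ _ _ _ _ _ _ c hcn (fun i hi => by omega)
        (by omega) (by rw [rowM3]; omega)
    · rw [if_neg h4]
      rw [natLoop_get_miss _ _ _ _ _ _ _ (fun i hi => by omega)]
      by_cases h3 : c = n / 2
      · rw [if_pos h3]
        exact natLoop_get_hit _ _ _ _ _ _ _ r hrn (fun i hi => by omega)
          (by omega) (by rw [rowM2]; omega)
      · rw [if_neg h3]
        rw [natLoop_get_miss _ _ _ _ _ _ _ (fun i hi => by omega)]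
        by_cases h2 : r = c
        · rw [if_pos h2]
          exact natLoop_get_hit _ _ _ _ _ _ _ r hrn (fun i hi => by omega)
            (by omega) (by rw [rowM1]; omega)
        · rw [if_neg h2]
          rw [natLoop_get_miss _ _ _ _ _ _ _ (fun i hi => by omega)]
          by_cases h1 : r = n / 2
          · rw [if_pos h1]
            refine natLoop_get_hit _ _ _ _ _ _ _ c hcn (fun i hi => by omega)
              (by omega) ?_
            rw [h1]; omega
          · rw [if_neg h1]
            rw [natLoop_get_miss _ _ _ _ _ _ _ (fun i hi => by omega)]
  · rw [if_neg hg]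
    rw [natLoop_get_miss _ _ _ _ _ _ _ (fun i hi => by omega),
      natLoop_get_miss _ _ _ _ _ _ _ (fun i hi => by omega),
      natLoop_get_miss _ _ _ _ _ _ _ (fun i hi => by omega),
      natLoop_get_miss _ _ _ _ _ _ _ (fun i hi => by omega)]

-- copying every cell reproduces the matrix
theorem map_nGet_id (arr : List (List Int)) :
    (List.range arr.length).map (fun r =>
      (List.range ((arr.getD r []).length)).map (fun c => nGet arr r c)) = arr := by
  apply List.ext_getElem
  · simp
  · intro i h1 h2
    have hi : i < arr.length := by simpa using h1
    simp only [List.getElem_map, List.getElem_range]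
    apply List.ext_getElem
    · simp [List.getElem?_eq_getElem hi]
    · intro j hj1 hj2
      simp only [List.getElem_map, List.getElem_range, nGet]
      rw [List.getD_eq_getElem arr ([] : List Int) hi,
        List.getD_eq_getElem _ (0 : Int) hj2]

-- B's port on non-positive width: the guard never fires, every cell is copied
theorem portB_nonpos (arr : List (List Int)) (width : Int) (hw : width ≤ 0) :
    rotateMinus45_alt arr width = arr := by
  conv_rhs => rw [← map_nGet_id arr]
  simp only [rotateMinus45_alt]
  rw [PySem.List.enumerate_eq_map_pyRange arr ([] : List Int)]
  simp only [PySem.List.len_eq, pyRange_natCast, List.map_map]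
  refine List.map_congr_left (fun r hr => ?_)
  simp only [Function.comp_apply, PySem.List.pyGetD_natCast]
  refine List.map_congr_left (fun c hc => ?_)
  simp only [Function.comp_apply]
  rw [if_neg (by rintro ⟨hcon, -⟩; omega)]
  exact pvGet2_natCast arr r c

-- ===== VERDICT (by name: the statement is the Claim_ definition above) =====
theorem rotateMinus45_spec : Claim_equal_rotateMinus45 := by
  intro arr width _hdom hpre
  unfold Spec_rotateMinus45
  rcases (by omega : width ≤ 0 ∨ 0 < width) with hw | hw
  · rw [portA_nonpos arr width hw, portB_nonpos arr width hw]
  · rcases hpre with h0 | ⟨h1, h2, h3⟩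
    · omega
    have hn : width = ((width.toNat : Nat) : Int) := by omega
    set n := width.toNat with hndef
    rw [hn, portA_norm, portB_norm]
    have hmid : n ≤ (arr.getD (n / 2) []).length := by omega
    have hrows : ∀ ρ < n, ρ < (arr.getD ρ []).length ∧ n / 2 < (arr.getD ρ []).length ∧
        n - 1 - ρ < (arr.getD ρ []).length := h3
    apply List.ext_getElem
    · simp only [length_natLoop, List.length_map, List.length_range]
    · intro i hA hB
      have hi : i < arr.length := by
        simpa only [length_natLoop] using hA
      simp only [List.getElem_map, List.getElem_range]
      apply List.ext_getElem
      · rw [← List.getD_eq_getElem _ ([] : List Int) hA]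
        simp only [rowLen_natLoop, List.length_map, List.length_range]
      · intro j hj1 hj2
        have hj : j < (arr.getD i []).length := by
          rw [← List.getD_eq_getElem _ ([] : List Int) hA] at hj1
          simpa only [rowLen_natLoop] using hj1
        simp only [List.getElem_map, List.getElem_range]
        rw [show (natLoop (fun i => n - 1 - i) (fun i => i) (fun i => nGet arr (n / 2) i) n
            (natLoop (fun i => i) (fun _ => n / 2) (fun i => nGet arr i (n - 1 - i)) n
              (natLoop (fun i => i) (fun i => i) (fun i => nGet arr i (n / 2)) n
                (natLoop (fun _ => n / 2) (fun i => i) (fun i => nGet arr i i) n arr))))[i][j] =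
            nGet (natLoop (fun i => n - 1 - i) (fun i => i) (fun i => nGet arr (n / 2) i) n
            (natLoop (fun i => i) (fun _ => n / 2) (fun i => nGet arr i (n - 1 - i)) n
              (natLoop (fun i => i) (fun i => i) (fun i => nGet arr i (n / 2)) n
                (natLoop (fun _ => n / 2) (fun i => i) (fun i => nGet arr i i) n arr)))) i j
          from by rw [nGet, List.getD_eq_getElem _ ([] : List Int) hA,
            List.getD_eq_getElem _ (0 : Int) hj1]]
        exact quad_entry arr n hmid hrows i j hi hj
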